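-- pv_equiv track=rewrite | github.com/tjarross/AdventOfCode | 2023/10/j10_2.py | get_points_inside_loop
-- ===== SOURCE A (Python) =====
-- def get_points_inside_loop(lines, coords, loop_coords):
--     line_length = len(lines[0])
--     points = 0
--     for coord in coords:
--         i = 0
--         intersections = 0
--         while coord[0] + i < line_length:
--             if lines[coord[1]][coord[0] + i] in ["J", "L", "|"] and [coord[0] + i, coord[1]] in loop_coords:
--                 intersections += 1
--             i += 1
--         if intersections % 2 != 0:
--             points += 1
--     return points
-- ===== SOURCE B (Python) =====
-- def get_points_inside_loop(lines, coords, loop_coords):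
--     width = len(lines[0])
--     loop = set(map(tuple, loop_coords))
--     suffix = {}  # row index -> s, where s[j] = crossings seen in columns j..width-1
--     points = 0
--     for coord in coords:
--         x = coord[0]
--         if x >= width:
--             continue  # the ray starts past the end of the row
--         y = coord[1]
--         if y not in suffix:
--             row = lines[y]
--             s = [0] * (width + 1)
--             for j in range(width - 1, -1, -1):
--                 s[j] = s[j + 1] + (row[j] in "JL|" and (j, y) in loop)
--             suffix[y] = s
--         if suffix[y][x] % 2:
--             points += 1
--     return points
-- ===== Notes on version B (the rewrite author's own statement) =====
-- stated objective: alternative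
-- what changed: Instead of rescanning the rest of the row and linearly searching loop_coords for every coordinate, B builds a set of loop cells once and caches, per visited row, a suffix array of ray-crossing counts, answering each coordinate by one array lookup; Pre_ excludes coordinates with a negative column index, where A's ray reads cells end-relatively (Python's negative-index artefact) outside the grid's natural domain.
-- outside the precondition, e.g. on get_points_inside_loop(['|'], [[-1, 0]], [[0, 0]]): A returns 1, B returns 0
import Mathlib
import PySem

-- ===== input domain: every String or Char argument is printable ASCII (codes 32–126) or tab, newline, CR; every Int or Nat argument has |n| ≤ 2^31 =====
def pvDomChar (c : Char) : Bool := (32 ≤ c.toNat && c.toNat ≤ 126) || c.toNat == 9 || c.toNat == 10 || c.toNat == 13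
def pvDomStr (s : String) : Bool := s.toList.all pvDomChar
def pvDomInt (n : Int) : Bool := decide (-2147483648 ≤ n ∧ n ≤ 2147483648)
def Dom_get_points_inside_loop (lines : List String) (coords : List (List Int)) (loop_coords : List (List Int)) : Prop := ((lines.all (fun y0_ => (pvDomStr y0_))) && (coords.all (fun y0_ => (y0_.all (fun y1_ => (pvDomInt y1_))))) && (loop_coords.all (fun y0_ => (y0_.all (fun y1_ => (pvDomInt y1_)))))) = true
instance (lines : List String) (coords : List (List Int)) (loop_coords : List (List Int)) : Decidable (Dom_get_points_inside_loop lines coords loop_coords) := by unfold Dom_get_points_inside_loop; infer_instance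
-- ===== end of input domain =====

-- B replaces A's per-coordinate rescan of the row and linear `in loop_coords` search by a set of
-- loop cells plus one cached suffix-count array per visited row, looked up once per coordinate
-- (objective: alternative algorithm; equal on all inputs admitted by Pre_).

-- ===== PORT A =====
-- char test `lines[y][j] in ["J","L","|"]` and list membership; none-cases are IndexErrors, excluded by Pre_
def pvAHit (lines : List String) (loop_coords : List (List Int)) (y j : Int) : Bool :=
  (match (PySem.List.pyGet? lines y).bind (fun row => PySem.Str.pyGet? row j) with
   | some ch => (ch == 'J' || ch == 'L' || ch == '|')
   | none => false) && loop_coords.contains [j, y]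

-- the `while coord[0] + i < line_length` loop, fuel = number of iterations, j = coord[0] + i
def pvAWhile (lines : List String) (loop_coords : List (List Int)) (y : Int) : Int → Nat → Int
  | _, 0 => 0
  | j, Nat.succ n =>
      (if pvAHit lines loop_coords y j then 1 else 0) + pvAWhile lines loop_coords y (j + 1) n

def pvAStep (lines : List String) (loop_coords : List (List Int)) (line_length : Int)
    (points : Int) (coord : List Int) : Int :=
  let x := (PySem.List.pyGet? coord 0).getD 0
  let y := (PySem.List.pyGet? coord 1).getD 0
  let intersections := pvAWhile lines loop_coords y x (line_length - x).toNat
  if PySem.Int.mod intersections 2 ≠ 0 then points + 1 else points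

def get_points_inside_loop (lines : List String) (coords : List (List Int)) (loop_coords : List (List Int)) : Int :=
  let line_length : Int := PySem.Str.len ((PySem.List.pyGet? lines 0).getD "")
  coords.foldl (pvAStep lines loop_coords line_length) 0

-- ===== PORT B =====
-- `row[j] in "JL|" and (j, y) in loop`; Python tuples of ints (any arity) are modelled as List Int
def pvBHit (row : List Char) (loop : PySem.Set (List Int)) (y j : Int) : Bool :=
  (match PySem.List.pyGet? row j with
   | some ch => (ch == 'J' || ch == 'L' || ch == '|')
   | none => false) && PySem.Set.contains loop [j, y]

-- the backward loop `for j in range(width-1, -1, -1): s[j] = s[j+1] + hit`, built front-to-back: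
-- pvBSuffix row loop y j n is the suffix slice s[j:] with n entries ahead of the final 0
def pvBSuffix (row : List Char) (loop : PySem.Set (List Int)) (y : Int) : Int → Nat → List Int
  | _, 0 => [0]
  | j, Nat.succ n =>
      let rest := pvBSuffix row loop y (j + 1) n
      (rest.headD 0 + (if pvBHit row loop y j then 1 else 0)) :: rest

def pvBStep (lines : List String) (loop : PySem.Set (List Int)) (width : Int)
    (st : PySem.Dict Int (List Int) × Int) (c : List Int) : PySem.Dict Int (List Int) × Int :=
  let x := (PySem.List.pyGet? c 0).getD 0
  if width ≤ x then st  -- `if x >= width: continue`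
  else
    let y := (PySem.List.pyGet? c 1).getD 0
    let d := if (st.1.get? y).isSome then st.1
             else st.1.insert y (pvBSuffix ((PySem.List.pyGet? lines y).getD "").toList loop y 0 width.toNat)
    let s := (d.get? y).getD []
    let n := (PySem.List.pyGet? s x).getD 0
    (d, st.2 + (if PySem.Int.mod n 2 ≠ 0 then 1 else 0))

def get_points_inside_loop_alt (lines : List String) (coords : List (List Int)) (loop_coords : List (List Int)) : Int :=
  let width : Int := PySem.Str.len ((PySem.List.pyGet? lines 0).getD "")
  let loop : PySem.Set (List Int) := PySem.Set.ofList loop_coords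
  (coords.foldl (pvBStep lines loop width) ((PySem.Dict.empty : PySem.Dict Int (List Int)), (0 : Int))).2

-- ===== PRECONDITION & SPEC =====
-- one coordinate is admissible iff either its ray starts at or past the row width (A scans nothing)
-- or it has a non-negative x and a y indexing a line that covers columns 0..width-1
-- (so A's scan performs only in-range column accesses)
def pvCoordOK (lines : List String) (W : Int) (c : List Int) : Bool :=
  decide (c ≠ []) &&
  (decide (W ≤ c.headD 0) ||
    (decide (0 ≤ c.headD 0) && decide (2 ≤ c.length) &&
     ((PySem.List.pyGet? lines ((c.drop 1).headD 0)).elim false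
        (fun row => decide (W ≤ PySem.Str.len row)))))

-- Pre_ requires a first line and admissible coordinates. Beyond the inputs where A raises an
-- IndexError, it excludes coordinates with a negative column index on which A still returns: there
-- A's ray reads cells end-relatively (Python's negative-index artefact), outside the task's
-- natural domain of grid points.
def Pre_get_points_inside_loop (lines : List String) (coords : List (List Int)) (loop_coords : List (List Int)) : Prop :=
  lines ≠ [] ∧
  (∀ c ∈ coords, pvCoordOK lines (PySem.Str.len (lines.headD "")) c = true)
instance (lines : List String) (coords : List (List Int)) (loop_coords : List (List Int)) : Decidable (Pre_get_points_inside_loop lines coords loop_coords) := by unfold Pre_get_points_inside_loop; infer_instance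

def pvWitness_get_points_inside_loop : List String × List (List Int) × List (List Int) :=
  (["|."], [[0, 0]], [[0, 0]])

def Spec_get_points_inside_loop (lines : List String) (coords : List (List Int)) (loop_coords : List (List Int)) (out : Int) : Prop := out = get_points_inside_loop_alt lines coords loop_coords
instance (lines : List String) (coords : List (List Int)) (loop_coords : List (List Int)) (out : Int) : Decidable (Spec_get_points_inside_loop lines coords loop_coords out) := by unfold Spec_get_points_inside_loop; infer_instance

-- ===== CLAIM (what is proved, stated in full; the proofs are below) =====
def Claim_equal_get_points_inside_loop : Prop := ∀ (lines : List String) (coords : List (List Int)) (loop_coords : List (List Int)), Dom_get_points_inside_loop lines coords loop_coords → Pre_get_points_inside_loop lines coords loop_coords → Spec_get_points_inside_loop lines coords loop_coords (get_points_inside_loop lines coords loop_coords)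

-- ===== LEMMAS AND PROOFS =====

-- B-side straight-line count from position j with n cells remaining
def pvBCnt (row : List Char) (loop : PySem.Set (List Int)) (y : Int) : Int → Nat → Int
  | _, 0 => 0
  | j, Nat.succ n => (if pvBHit row loop y j then 1 else 0) + pvBCnt row loop y (j + 1) n

theorem pvBSuffix_headD (row : List Char) (loop : PySem.Set (List Int)) (y : Int) :
    ∀ (n : Nat) (j : Int), (pvBSuffix row loop y j n).headD 0 = pvBCnt row loop y j n := by
  intro n
  induction n with
  | zero => intro j; simp [pvBSuffix, pvBCnt]
  | succ n ih =>
      intro j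
      have h := ih (j + 1)
      simp [pvBSuffix, pvBCnt] at h ⊢
      omega

theorem pvBSuffix_get (row : List Char) (loop : PySem.Set (List Int)) (y : Int) :
    ∀ (n : Nat) (j : Int) (k : Nat), k ≤ n →
      PySem.List.pyGet? (pvBSuffix row loop y j n) (k : Int) = some (pvBCnt row loop y (j + k) (n - k)) := by
  intro n
  induction n with
  | zero =>
      intro j k hk
      interval_cases k
      simp [pvBSuffix, pvBCnt]
  | succ n ih =>
      intro j k hk
      cases k with
      | zero =>
          have h := pvBSuffix_headD row loop y n (j + 1)
          simp [pvBSuffix, pvBCnt] at h ⊢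
          omega
      | succ k =>
          have hk' : k ≤ n := by omega
          have h := ih (j + 1) k hk'
          simp only [PySem.List.pyGet?_natCast] at h ⊢
          simp [pvBSuffix]
          rw [show j + ((k : Int) + 1) = j + 1 + (k : Int) by ring]
          exact h

-- set membership in set(map(tuple, loop_coords)) coincides with A's list membership
theorem pvLoopSet_mem (loop_coords : List (List Int)) (v : List Int) :
    PySem.Set.contains (PySem.Set.ofList loop_coords) v = loop_coords.contains v := by
  rcases h : loop_coords.contains v with _ | _
  · rw [Bool.eq_false_iff]
    intro hc
    rw [PySem.Set.contains_iff, PySem.Set.mem_ofList] at hc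
    simp at h
    exact h hc
  · rw [List.contains_iff_mem] at h
    rw [PySem.Set.contains_iff, PySem.Set.mem_ofList]
    exact h

theorem pvHit_eq (lines : List String) (loop_coords : List (List Int)) (rowS : String) (y j : Int)
    (hrow : PySem.List.pyGet? lines y = some rowS) :
    pvAHit lines loop_coords y j = pvBHit rowS.toList (PySem.Set.ofList loop_coords) y j := by
  unfold pvAHit pvBHit
  rw [hrow, pvLoopSet_mem]
  simp

theorem pvCnt_eq (lines : List String) (loop_coords : List (List Int)) (rowS : String) (y : Int)
    (hrow : PySem.List.pyGet? lines y = some rowS) :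
    ∀ (n : Nat) (j : Int),
      pvAWhile lines loop_coords y j n = pvBCnt rowS.toList (PySem.Set.ofList loop_coords) y j n := by
  intro n
  induction n with
  | zero => intro j; rfl
  | succ n ih =>
      intro j
      simp [pvAWhile, pvBCnt, ih (j + 1), pvHit_eq lines loop_coords rowS y j hrow]

-- the canonical per-row suffix array B caches
def pvCanon (lines : List String) (loop : PySem.Set (List Int)) (W : Int) (y : Int) : List Int :=
  pvBSuffix ((PySem.List.pyGet? lines y).getD "").toList loop y 0 W.toNat

def pvInv (lines : List String) (loop : PySem.Set (List Int)) (W : Int) (d : PySem.Dict Int (List Int)) : Prop :=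
  ∀ k v, d.get? k = some v → v = pvCanon lines loop W k

theorem pvFold_eq (lines : List String) (loop_coords : List (List Int)) (W : Int) (hW0 : 0 ≤ W) :
    ∀ (coords : List (List Int)) (d : PySem.Dict Int (List Int)) (p : Int),
      pvInv lines (PySem.Set.ofList loop_coords) W d →
      (∀ c ∈ coords, pvCoordOK lines W c = true) →
      coords.foldl (pvAStep lines loop_coords W) p
        = (coords.foldl (pvBStep lines (PySem.Set.ofList loop_coords) W) (d, p)).2 := by
  intro coords
  induction coords with
  | nil => intro d p _ _; rfl
  | cons c rest ih =>
      intro d p hInv hok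
      have hrest : ∀ c ∈ rest, pvCoordOK lines W c = true := fun c hcm => hok c (List.mem_cons_of_mem _ hcm)
      have hc := hok c (by simp)
      simp only [pvCoordOK, Bool.and_eq_true, Bool.or_eq_true, decide_eq_true_eq] at hc
      obtain ⟨hne, hc⟩ := hc
      match c, hne with
      | x :: t, _ =>
        have hx : (PySem.List.pyGet? (x :: t) 0).getD 0 = x := by
          rw [PySem.List.pyGet?_zero_cons]; rfl
        simp only [List.foldl_cons, pvAStep, pvBStep, hx]
        by_cases hxW : W ≤ x
        · -- the ray starts at or past the end of the row: A counts nothing, B skips the coordinate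
          rw [show (W - x).toNat = 0 by omega]
          rw [if_pos hxW]
          have hz : pvAWhile lines loop_coords ((PySem.List.pyGet? (x :: t) 1).getD 0) x 0 = 0 := rfl
          rw [hz]
          rw [if_neg (by simp [PySem.Int.mod])]
          exact ih d p hInv hrest
        · rw [if_neg hxW]
          rcases hc with hcontr | hc2
          · simp only [List.headD_cons] at hcontr; omega
          obtain ⟨⟨hx0, hlen⟩, helim⟩ := hc2
          simp only [List.headD_cons] at hx0
          match t, hlen with
          | y :: t', _ =>
            simp only [List.drop_succ_cons, List.drop_zero, List.headD_cons] at helim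
            have hy : (PySem.List.pyGet? (x :: y :: t') 1).getD 0 = y := by
              rw [show (1 : Int) = ((1 : Nat) : Int) from rfl, PySem.List.pyGet?_natCast]; rfl
            rw [hy]
            obtain ⟨rowS, hrow⟩ : ∃ rowS, PySem.List.pyGet? lines y = some rowS := by
              cases hro : PySem.List.pyGet? lines y with
              | none => rw [hro] at helim; exact absurd helim (by simp)
              | some r => exact ⟨r, rfl⟩
            -- B's looked-up count equals A's intersection count
            have hsx : (PySem.List.pyGet? (pvCanon lines (PySem.Set.ofList loop_coords) W y) x).getD 0
                = pvAWhile lines loop_coords y x (W - x).toNat := by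
              unfold pvCanon
              rw [hrow]
              simp only [Option.getD_some]
              rw [pvCnt_eq lines loop_coords rowS y hrow]
              have hk : x.toNat ≤ W.toNat := by omega
              have hget := pvBSuffix_get rowS.toList (PySem.Set.ofList loop_coords) y W.toNat 0 x.toNat hk
              rw [show ((x.toNat : Nat) : Int) = x from Int.toNat_of_nonneg hx0] at hget
              rw [show (0 : Int) + x = x by ring] at hget
              rw [show W.toNat - x.toNat = (W - x).toNat by omega] at hget
              rw [hget, Option.getD_some]
            have hpts : ∀ m : Int, (if PySem.Int.mod m 2 ≠ 0 then p + 1 else p)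
                = p + (if PySem.Int.mod m 2 ≠ 0 then 1 else 0) := by
              intro m; split_ifs <;> ring
            by_cases hmem : (d.get? y).isSome
            · obtain ⟨v, hv⟩ := Option.isSome_iff_exists.mp hmem
              have hveq : v = pvCanon lines (PySem.Set.ofList loop_coords) W y := hInv y v hv
              rw [if_pos hmem, hv]
              simp only [Option.getD_some, hveq, hsx, hpts]
              exact ih d _ hInv hrest
            · rw [if_neg hmem]
              have hins : (d.insert y (pvBSuffix ((PySem.List.pyGet? lines y).getD "").toList (PySem.Set.ofList loop_coords) y 0 W.toNat)).get? y
                  = some (pvCanon lines (PySem.Set.ofList loop_coords) W y) :=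
                PySem.Dict.get?_insert_self _ _ _
              rw [hins]
              simp only [Option.getD_some, hsx, hpts]
              refine ih _ _ ?_ hrest
              intro k v hkv
              rw [PySem.Dict.get?_insert] at hkv
              by_cases hky : k = y
              · simp [hky] at hkv; subst hky; exact hkv.symm
              · rw [if_neg hky] at hkv; exact hInv k v hkv

-- ===== VERDICT (by name: the statement is the Claim_ definition above) =====
theorem get_points_inside_loop_spec : Claim_equal_get_points_inside_loop := by
  intro lines coords loop_coords _ hPre
  obtain ⟨hne, hcoords⟩ := hPre
  unfold Spec_get_points_inside_loop get_points_inside_loop get_points_inside_loop_alt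
  cases lines with
  | nil => exact absurd rfl hne
  | cons l ls =>
      have hW : PySem.Str.len ((PySem.List.pyGet? (l :: ls) 0).getD "") = PySem.Str.len ((l :: ls).headD "") := by
        rw [PySem.List.pyGet?_zero_cons]; rfl
      refine pvFold_eq (l :: ls) loop_coords _ ?_ coords PySem.Dict.empty 0 ?_ ?_
      · rw [hW]
        simp [PySem.Str.len_eq]
      · intro k v hkv
        rw [PySem.Dict.get?_empty] at hkv
        exact absurd hkv (by simp)
      · intro c hcm
        have := hcoords c hcm
        rw [hW]
        exact this
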